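-- pv_equiv track=rewrite | github.com/SHUcream00/CodingPractices | MeetupSchedule.py | meetup
-- ===== SOURCE A (Python) =====
-- def meetup(arrival, departure) -> int:
--     investors = sorted(list(zip(arrival, departure)), key = lambda x: x[1])
--     total, days = 0, []
--
--     for i in investors:
--         for j in range(i[0], i[1]+1):
--             if j not in days:
--                 days.append(j)
--                 total += 1
--                 break
--     return total
-- ===== SOURCE B (Python) =====
-- def meetup(arrival, departure) -> int:
--     investors = sorted(zip(arrival, departure), key=lambda x: x[1])
--     nxt = {}          # union-find "next candidate free day" pointers
--     total = 0
--     for a, b in investors: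
--         d = a
--         seen = []
--         while d in nxt:       # walk to the earliest free day >= a
--             seen.append(d)
--             d = nxt[d]
--         for s in seen:        # path compression
--             nxt[s] = d
--         if d <= b:
--             nxt[d] = d + 1
--             total += 1
--     return total
-- ===== Notes on version B (the rewrite author's own statement) =====
-- stated objective: faster
-- what changed: B replaces A's linear scan over candidate days with list membership by an interval union-find: a 'next free day' pointer dict with path compression gives each investor its earliest free day directly.
import Mathlib
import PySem

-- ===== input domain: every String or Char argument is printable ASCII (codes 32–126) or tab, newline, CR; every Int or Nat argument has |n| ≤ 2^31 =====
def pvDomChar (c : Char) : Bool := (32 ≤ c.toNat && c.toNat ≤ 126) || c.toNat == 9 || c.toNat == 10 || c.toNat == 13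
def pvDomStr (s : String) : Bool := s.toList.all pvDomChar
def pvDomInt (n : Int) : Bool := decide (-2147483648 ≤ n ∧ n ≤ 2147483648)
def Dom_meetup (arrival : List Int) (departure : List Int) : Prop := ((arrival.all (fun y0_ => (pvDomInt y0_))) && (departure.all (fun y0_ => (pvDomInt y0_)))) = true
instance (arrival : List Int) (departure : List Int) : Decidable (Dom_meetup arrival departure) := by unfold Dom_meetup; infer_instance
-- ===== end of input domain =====

-- B replaces A's day-by-day scan (with list membership) by an interval union-find
-- ("next free day" pointers with path compression); same greedy, asymptotically faster.

-- ===== PORT A =====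
-- inner 'for j in range(i[0], i[1]+1): if j not in days: …; break' — ported as a
-- recursion returning the day picked (none = the loop fell through); exact step for step.
def meetupInner (days : List Int) (j b : Int) : Option Int :=
  if _h : j ≤ b then
    (if days.contains j then meetupInner days (j + 1) b else some j)
  else none
termination_by (b + 1 - j).toNat
decreasing_by omega

def meetupStep (st : Int × List Int) (i : Int × Int) : Int × List Int :=
  match meetupInner st.2 i.1 i.2 with
  | some j => (st.1 + 1, st.2 ++ [j])
  | none => st

def meetup (arrival : List Int) (departure : List Int) : Int :=
  let investors := PySem.List.sorted (arrival.zip departure) (fun x => x.2) false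
  (investors.foldl meetupStep (0, [])).1

-- ===== PORT B =====
-- 'while d in nxt: seen.append(d); d = nxt[d]' — the fuel (nxt.size + 1) only makes the
-- loop total; it is proved sufficient on every state the fold reaches (walk_spec below).
def meetupWalk (nxt : PySem.Dict Int Int) : Nat → Int → List Int → List Int × Int
  | 0, d, seen => (seen, d)
  | fuel + 1, d, seen =>
    match nxt.get? d with
    | some e => meetupWalk nxt fuel e (seen ++ [d])
    | none => (seen, d)

def meetupAltStep (st : Int × PySem.Dict Int Int) (i : Int × Int) : Int × PySem.Dict Int Int :=
  let w := meetupWalk st.2 (st.2.size + 1) i.1 []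
  let nxt1 := w.1.foldl (fun m s => m.insert s w.2) st.2
  if w.2 ≤ i.2 then (st.1 + 1, nxt1.insert w.2 (w.2 + 1)) else (st.1, nxt1)

def meetup_alt (arrival : List Int) (departure : List Int) : Int :=
  let investors := PySem.List.sorted (arrival.zip departure) (fun x => x.2) false
  (investors.foldl meetupAltStep (0, PySem.Dict.empty)).1

-- ===== PRECONDITION & SPEC =====
def Spec_meetup (arrival : List Int) (departure : List Int) (out : Int) : Prop := out = meetup_alt arrival departure
instance (arrival : List Int) (departure : List Int) (out : Int) : Decidable (Spec_meetup arrival departure out) := by unfold Spec_meetup; infer_instance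

-- ===== CLAIM (what is proved, stated in full; the proofs are below) =====
def Claim_equal_meetup : Prop := ∀ (arrival : List Int) (departure : List Int), Dom_meetup arrival departure → Spec_meetup arrival departure (meetup arrival departure)

-- ===== LEMMAS AND PROOFS =====

-- coupling invariant between A's used-day list and B's pointer dict:
-- same key set, nodup keys, and every pointer jumps forward over used days only.
def MeetRel (days : List Int) (nxt : PySem.Dict Int Int) : Prop :=
  nxt.keys.Nodup ∧
  (∀ j : Int, j ∈ days ↔ (nxt.get? j).isSome) ∧
  (∀ d e : Int, nxt.get? d = some e →
    d < e ∧ ∀ j : Int, d < j → j < e → (nxt.get? j).isSome)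

theorem countP_lt_of_witness {l : List Int} {p q : Int → Bool}
    (hpq : ∀ x ∈ l, p x = true → q x = true) {a : Int} (ha : a ∈ l)
    (hqa : q a = true) (hpa : p a = false) : l.countP p < l.countP q := by
  induction l with
  | nil => cases ha
  | cons x t ih =>
    have hmono : t.countP p ≤ t.countP q :=
      List.countP_mono_left (fun x hx hpx => hpq x (List.mem_cons_of_mem _ hx) hpx)
    rcases List.mem_cons.mp ha with rfl | hat
    · simp [hpa, hqa]; omega
    · have := ih (fun x hx => hpq x (List.mem_cons_of_mem _ hx)) hat
      by_cases hx : p x = true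
      · simp [hx, hpq x (List.mem_cons_self) hx]; omega
      · simp only [List.countP_cons, hx]
        by_cases hqx : q x = true <;> simp [hqx] <;> omega

theorem walk_spec (nxt : PySem.Dict Int Int)
    (hInv : ∀ d e : Int, nxt.get? d = some e →
      d < e ∧ ∀ j : Int, d < j → j < e → (nxt.get? j).isSome) :
    ∀ (fuel : Nat) (a : Int) (seen : List Int),
      nxt.keys.countP (fun k => a ≤ k) < fuel →
      nxt.get? (meetupWalk nxt fuel a seen).2 = none ∧
      a ≤ (meetupWalk nxt fuel a seen).2 ∧
      (∀ j : Int, a ≤ j → j < (meetupWalk nxt fuel a seen).2 → (nxt.get? j).isSome) ∧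
      (∀ s ∈ (meetupWalk nxt fuel a seen).1,
        s ∈ seen ∨ (a ≤ s ∧ s < (meetupWalk nxt fuel a seen).2)) := by
  intro fuel
  induction fuel with
  | zero => intro a seen h; omega
  | succ fuel ih =>
    intro a seen hcount
    cases h : nxt.get? a with
    | none =>
      have hwk : meetupWalk nxt (fuel + 1) a seen = (seen, a) := by
        simp [meetupWalk, h]
      rw [hwk]
      exact ⟨h, le_refl _, fun j h1 h2 => absurd (lt_of_le_of_lt h1 h2) (lt_irrefl _), fun s hs => Or.inl hs⟩
    | some e =>
      obtain ⟨hae, hcov⟩ := hInv a e h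
      have hakeys : a ∈ nxt.keys := by
        by_contra hk
        rw [(PySem.Dict.get?_eq_none_iff_not_mem_keys _ _).mpr hk] at h
        cases h
      have hlt : nxt.keys.countP (fun k => e ≤ k) < nxt.keys.countP (fun k => a ≤ k) := by
        apply countP_lt_of_witness (a := a)
        · intro x _ hx
          simp only [decide_eq_true_eq] at hx ⊢
          omega
        · exact hakeys
        · simp
        · simp; omega
      have hcount' : nxt.keys.countP (fun k => e ≤ k) < fuel := by omega
      obtain ⟨h1, h2, h3, h4⟩ := ih e (seen ++ [a]) hcount'
      have hwk : meetupWalk nxt (fuel + 1) a seen = meetupWalk nxt fuel e (seen ++ [a]) := by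
        simp [meetupWalk, h]
      rw [hwk]
      refine ⟨h1, by omega, ?_, ?_⟩
      · intro j hj1 hj2
        by_cases hje : j < e
        · by_cases hja : j = a
          · subst hja; simp [h]
          · exact hcov j (by omega) hje
        · exact h3 j (by omega) hj2
      · intro s hs
        rcases h4 s hs with hs' | hs'
        · rcases List.mem_append.mp hs' with hs'' | hs''
          · exact Or.inl hs''
          · have : s = a := by simpa using hs''
            subst this
            exact Or.inr ⟨le_refl _, by omega⟩
        · exact Or.inr ⟨by omega, hs'.2⟩

theorem get?_foldl_insert_const (seen : List Int) (d : Int) (m : PySem.Dict Int Int) (k : Int) :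
    (seen.foldl (fun m s => m.insert s d) m).get? k =
      if k ∈ seen then some d else m.get? k := by
  induction seen generalizing m with
  | nil => simp
  | cons s t ih =>
    simp only [List.foldl_cons, ih, PySem.Dict.get?_insert, List.mem_cons]
    by_cases h1 : k ∈ t <;> by_cases h2 : k = s <;> simp [h1, h2]

theorem innerA_eq (days : List Int) (b d : Int) (hd : days.contains d = false) :
    ∀ (n : Nat) (a : Int), (d - a).toNat = n → a ≤ d →
      (∀ j : Int, a ≤ j → j < d → days.contains j = true) →
      meetupInner days a b = if d ≤ b then some d else none := by
  intro n
  induction n using Nat.strong_induction_on with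
  | _ n ih =>
    intro a hn had hcov
    unfold meetupInner
    by_cases hab : a ≤ b
    · by_cases heq : a = d
      · subst heq
        have hnot : a ∉ days := by simpa using hd
        simp [hab, hnot]
      · have hlt : a < d := by omega
        have hca : days.contains a = true := hcov a (le_refl _) hlt
        simp only [hab, dite_true, hca, if_true]
        exact ih (d - (a + 1)).toNat (by omega) (a + 1) rfl (by omega)
          (fun j h1 h2 => hcov j (by omega) h2)
    · have hdb : ¬ d ≤ b := by omega
      simp [hab, hdb]

theorem alloc_rel (days : List Int) (m : PySem.Dict Int Int) (d : Int)
    (hR : MeetRel days m) (_hfree : m.get? d = none) :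
    MeetRel (days ++ [d]) (m.insert d (d + 1)) := by
  obtain ⟨hnd, hmem, hinv⟩ := hR
  refine ⟨PySem.Dict.nodup_keys_insert _ _ _ hnd, ?_, ?_⟩
  · intro j
    rw [List.mem_append, List.mem_singleton, PySem.Dict.get?_insert]
    by_cases hj : j = d
    · simp [hj]
    · simp [hj, hmem j]
  · intro d' e' h'
    rw [PySem.Dict.get?_insert] at h'
    by_cases hd' : d' = d
    · rw [if_pos hd'] at h'
      injection h' with h'
      refine ⟨by omega, fun j h1 h2 => absurd (by omega : j < j) (lt_irrefl _)⟩
    · rw [if_neg hd'] at h'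
      obtain ⟨hlt, hcov⟩ := hinv d' e' h'
      refine ⟨hlt, fun j h1 h2 => ?_⟩
      rw [PySem.Dict.get?_insert]
      by_cases hj : j = d
      · simp [hj]
      · simp only [hj, if_false]
        exact hcov j h1 h2

theorem step_eq (days : List Int) (nxt : PySem.Dict Int Int) (t : Int) (i : Int × Int)
    (hR : MeetRel days nxt) :
    (meetupStep (t, days) i).1 = (meetupAltStep (t, nxt) i).1 ∧
    MeetRel (meetupStep (t, days) i).2 (meetupAltStep (t, nxt) i).2 := by
  obtain ⟨hnd, hmem, hinv⟩ := hR
  -- the walk finds the first free day ≥ i.1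
  have hfuel : nxt.keys.countP (fun k => i.1 ≤ k) < nxt.size + 1 := by
    have h1 : nxt.keys.countP (fun k => i.1 ≤ k) ≤ nxt.keys.length := List.countP_le_length
    have h2 : nxt.keys.length = nxt.size := by
      simp [PySem.Dict.keys, PySem.Dict.size]
    omega
  obtain ⟨hfree, ha, hcov, hseen0⟩ := walk_spec nxt hinv (nxt.size + 1) i.1 [] hfuel
  set w := meetupWalk nxt (nxt.size + 1) i.1 [] with hw
  have hseen : ∀ s ∈ w.1, i.1 ≤ s ∧ s < w.2 := by
    intro s hs
    rcases hseen0 s hs with h | h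
    · cases h
    · exact h
  -- A's inner scan returns exactly that day (or nothing)
  have hinner : meetupInner days i.1 i.2 = if w.2 ≤ i.2 then some w.2 else none := by
    have hdnot : days.contains w.2 = false := by
      have : w.2 ∉ days := fun hmem' => by
        have := (hmem w.2).mp hmem'
        rw [hfree] at this
        cases this
      simpa using this
    exact innerA_eq days i.2 w.2 hdnot (w.2 - i.1).toNat i.1 rfl ha
      (fun j h1 h2 => by
        have : j ∈ days := (hmem j).mpr (hcov j h1 h2)
        simpa using this)
  -- B's compressed dict nxt1 still represents the same used-day set
  set nxt1 := w.1.foldl (fun m s => m.insert s w.2) nxt with hnxt1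
  have hget1 : ∀ k : Int, nxt1.get? k = if k ∈ w.1 then some w.2 else nxt.get? k :=
    fun k => get?_foldl_insert_const w.1 w.2 nxt k
  have hnd1 : nxt1.keys.Nodup :=
    PySem.Dict.nodup_keys_foldl_insert w.1 (fun _ _ => w.2) nxt hnd
  have hrel1 : MeetRel days nxt1 := by
    refine ⟨hnd1, ?_, ?_⟩
    · intro j
      rw [hget1 j]
      by_cases hj : j ∈ w.1
      · simp only [hj, if_true, Option.isSome_some]
        obtain ⟨h1, h2⟩ := hseen j hj
        exact ⟨fun _ => trivial, fun _ => (hmem j).mpr (hcov j h1 h2)⟩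
      · simp [hj, hmem j]
    · intro d' e' h'
      rw [hget1 d'] at h'
      by_cases hd' : d' ∈ w.1
      · rw [if_pos hd'] at h'
        injection h' with h'
        obtain ⟨h1, h2⟩ := hseen d' hd'
        refine ⟨by omega, fun j hj1 hj2 => ?_⟩
        rw [hget1 j]
        by_cases hj : j ∈ w.1
        · simp [hj]
        · simp only [hj, if_false]
          exact hcov j (by omega) (by omega)
      · rw [if_neg hd'] at h'
        obtain ⟨h1, h2⟩ := hinv d' e' h'
        refine ⟨h1, fun j hj1 hj2 => ?_⟩
        rw [hget1 j]
        by_cases hj : j ∈ w.1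
        · simp [hj]
        · simp only [hj, if_false]
          exact h2 j hj1 hj2
  have hfree1 : nxt1.get? w.2 = none := by
    rw [hget1 w.2]
    have : w.2 ∉ w.1 := fun h => absurd (hseen w.2 h).2 (lt_irrefl _)
    simp [this, hfree]
  simp only [meetupStep, meetupAltStep, hinner, ← hw, ← hnxt1]
  by_cases hdb : w.2 ≤ i.2
  · simp only [hdb, if_true]
    exact ⟨trivial, alloc_rel days nxt1 w.2 hrel1 hfree1⟩
  · simp only [hdb, if_false]
    exact ⟨trivial, hrel1⟩

theorem fold_eq (inv : List (Int × Int)) :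
    ∀ (t : Int) (days : List Int) (nxt : PySem.Dict Int Int), MeetRel days nxt →
    (inv.foldl meetupStep (t, days)).1 = (inv.foldl meetupAltStep (t, nxt)).1 := by
  induction inv with
  | nil => intro t days nxt _; rfl
  | cons i rest ih =>
    intro t days nxt hR
    obtain ⟨h1, h2⟩ := step_eq days nxt t i hR
    simp only [List.foldl_cons]
    have : (meetupStep (t, days) i) = ((meetupStep (t, days) i).1, (meetupStep (t, days) i).2) := rfl
    rw [this, show (meetupAltStep (t, nxt) i) = ((meetupAltStep (t, nxt) i).1, (meetupAltStep (t, nxt) i).2) from rfl, h1]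
    exact ih _ _ _ h2


-- ===== VERDICT (by name: the statement is the Claim_ definition above) =====
theorem meetup_spec : Claim_equal_meetup := by
  intro arrival departure _
  unfold Spec_meetup meetup meetup_alt
  exact fold_eq _ 0 [] PySem.Dict.empty
    ⟨by simp, by simp, by simp⟩
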